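-- pv_equiv track=rewrite | github.com/yzouag/leetcode | adobe.py | freelancing_platform
-- ===== SOURCE A (Python) =====
-- from typing import List
--
-- def freelancing_platform(numProjects: int, projectID: List[int], bid: List[int]) -> int:
--     project_bids = {}
--     for i in range(len(projectID)):
--         if projectID[i] not in project_bids:
--             project_bids[projectID[i]] = bid[i]
--         else:
--             project_bids[projectID[i]] = min(project_bids[projectID[i]], bid[i])
--     if len(project_bids) < numProjects:
--         return -1
--     return sum(project_bids.values())
-- ===== SOURCE B (Python) =====
-- from typing import List
--
-- def freelancing_platform(numProjects: int, projectID: List[int], bid: List[int]) -> int: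
--     pairs = [(projectID[i], bid[i]) for i in range(len(projectID))]
--     pairs.sort(key=lambda p: p[0])
--     count = 0
--     total = 0
--     i = 0
--     n = len(pairs)
--     while i < n:
--         k = pairs[i][0]
--         m = pairs[i][1]
--         i += 1
--         while i < n and pairs[i][0] == k:
--             if pairs[i][1] < m:
--                 m = pairs[i][1]
--             i += 1
--         count += 1
--         total += m
--     return -1 if count < numProjects else total
-- ===== Notes on version B (the rewrite author's own statement) =====
-- stated objective: alternative
-- what changed: Replaced A's dict of running minimums by building the (projectID, bid) pair list, sorting it by project ID, and a single grouping sweep that accumulates each group's minimum and a distinct-project count.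
import Mathlib
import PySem

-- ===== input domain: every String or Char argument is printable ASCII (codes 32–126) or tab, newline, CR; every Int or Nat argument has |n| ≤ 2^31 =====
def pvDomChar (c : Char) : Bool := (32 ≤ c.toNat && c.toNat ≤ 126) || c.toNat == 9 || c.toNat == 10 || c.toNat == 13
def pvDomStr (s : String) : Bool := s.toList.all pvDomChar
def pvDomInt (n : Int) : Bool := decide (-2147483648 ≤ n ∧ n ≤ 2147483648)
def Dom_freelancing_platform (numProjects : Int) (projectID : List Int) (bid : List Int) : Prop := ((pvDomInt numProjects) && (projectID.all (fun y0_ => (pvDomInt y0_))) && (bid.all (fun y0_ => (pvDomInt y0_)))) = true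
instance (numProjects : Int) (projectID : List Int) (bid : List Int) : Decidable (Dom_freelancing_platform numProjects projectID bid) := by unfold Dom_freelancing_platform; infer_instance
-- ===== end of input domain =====

-- B replaces A's dict of running minimums by sort-by-project-ID plus one grouping sweep
-- (alternative decomposition, not claimed faster); equal return values on Pre_ (bid at least as long as projectID).

-- ===== PORT A =====
def freelancing_platform (numProjects : Int) (projectID : List Int) (bid : List Int) : Int :=
  let d : PySem.Dict Int Int :=
    (PySem.List.pyRange 0 (PySem.List.len projectID) 1).foldl
      (fun d i =>
        if d.contains (PySem.List.pyGetD projectID i 0) = false then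
          d.insert (PySem.List.pyGetD projectID i 0) (PySem.List.pyGetD bid i 0)
        else
          d.insert (PySem.List.pyGetD projectID i 0)
            (min (d.getD (PySem.List.pyGetD projectID i 0) 0) (PySem.List.pyGetD bid i 0)))
      PySem.Dict.empty
  if (d.size : Int) < numProjects then -1 else d.values.sum

-- ===== PORT B =====
-- inner while: consume pairs with key k, keeping the running minimum m; returns (m, remaining pairs)
def pvSweepGroup (k m : Int) : List (Int × Int) → Int × List (Int × Int)
  | [] => (m, [])
  | p :: rest =>
      if p.1 = k then pvSweepGroup k (if p.2 < m then p.2 else m) rest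
      else (m, p :: rest)

theorem pvSweepGroup_len (k m : Int) (l : List (Int × Int)) :
    (pvSweepGroup k m l).2.length ≤ l.length := by
  induction l generalizing m with
  | nil => simp [pvSweepGroup]
  | cons p rest ih =>
      simp only [pvSweepGroup]
      split
      · exact le_trans (ih _) (by simp)
      · simp

-- outer while: one step per group of equal project IDs; returns (distinct count, sum of minimums)
def pvSweep : List (Int × Int) → Int × Int
  | [] => (0, 0)
  | p :: rest =>
      let g := pvSweepGroup p.1 p.2 rest
      let r := pvSweep g.2
      (r.1 + 1, r.2 + g.1)
  termination_by l => l.length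
  decreasing_by
    have := pvSweepGroup_len p.1 p.2 rest
    simp
    omega

def freelancing_platform_alt (numProjects : Int) (projectID : List Int) (bid : List Int) : Int :=
  let pairs := (PySem.List.pyRange 0 (PySem.List.len projectID) 1).map
    (fun i => (PySem.List.pyGetD projectID i 0, PySem.List.pyGetD bid i 0))
  let sp := PySem.List.sorted pairs (fun p => p.1) false
  let r := pvSweep sp
  if r.1 < numProjects then -1 else r.2

-- ===== PRECONDITION & SPEC =====
-- Pre_ excludes exactly the inputs with len(bid) < len(projectID), on which A (and B) raise IndexError at bid[i].
def Pre_freelancing_platform (numProjects : Int) (projectID : List Int) (bid : List Int) : Prop :=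
  projectID.length ≤ bid.length
instance (numProjects : Int) (projectID : List Int) (bid : List Int) : Decidable (Pre_freelancing_platform numProjects projectID bid) := by unfold Pre_freelancing_platform; infer_instance
def pvWitness_freelancing_platform : Int × List Int × List Int := (2, [1, 2, 1], [5, 3, 4])

def Spec_freelancing_platform (numProjects : Int) (projectID : List Int) (bid : List Int) (out : Int) : Prop := out = freelancing_platform_alt numProjects projectID bid
instance (numProjects : Int) (projectID : List Int) (bid : List Int) (out : Int) : Decidable (Spec_freelancing_platform numProjects projectID bid out) := by unfold Spec_freelancing_platform; infer_instance

-- ===== CLAIM (what is proved, stated in full; the proofs are below) =====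
def Claim_equal_freelancing_platform : Prop := ∀ (numProjects : Int) (projectID : List Int) (bid : List Int), Dom_freelancing_platform numProjects projectID bid → Pre_freelancing_platform numProjects projectID bid → Spec_freelancing_platform numProjects projectID bid (freelancing_platform numProjects projectID bid)

-- ===== LEMMAS AND PROOFS =====

def pvMstep (o : Option Int) (b : Int) : Option Int :=
  some (match o with | none => b | some m => min m b)

def pvBids (ps : List (Int × Int)) (k : Int) : List Int :=
  (ps.filter (fun p => p.1 == k)).map Prod.snd

def pvVal (ps : List (Int × Int)) (k : Int) : Int :=
  ((pvBids ps k).foldl pvMstep none).getD 0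

def pvKeys (ps : List (Int × Int)) : List Int :=
  PySem.Set.ofList (ps.map Prod.fst)

theorem pvSweepGroup_eq (k m : Int) (l : List (Int × Int)) :
    pvSweepGroup k m l
      = ((l.takeWhile (fun p => p.1 == k)).foldl (fun m p => min m p.2) m,
         l.dropWhile (fun p => p.1 == k)) := by
  induction l generalizing m with
  | nil => simp [pvSweepGroup]
  | cons p rest ih =>
      simp only [pvSweepGroup, List.takeWhile_cons, List.dropWhile_cons]
      by_cases hp : p.1 = k
      · have hm : (if p.2 < m then p.2 else m) = min m p.2 := by omega
        simp [hp, ih, hm]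
      · simp [hp]

theorem discard_not_mem (s : List Int) (x : Int) (hs : x ∉ s) :
    PySem.Set.discard s x = s := by
  simp only [PySem.Set.discard]
  apply List.filter_eq_self.mpr
  intro a ha
  have : a ≠ x := fun he => hs (he ▸ ha)
  simp [this]

theorem discard_cons_self (s : List Int) (x : Int) :
    PySem.Set.discard (x :: s) x = PySem.Set.discard s x := by
  simp [PySem.Set.discard]

theorem discard_discard (s : List Int) (x : Int) :
    PySem.Set.discard (PySem.Set.discard s x) x = PySem.Set.discard s x := by
  simp [PySem.Set.discard, List.filter_filter]

theorem discard_ofList (l1 l2 : List Int) (x : Int)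
    (h1 : ∀ y ∈ l1, y = x) (h2 : x ∉ l2) :
    PySem.Set.ofList (x :: (l1 ++ l2)) = x :: PySem.Set.ofList l2 := by
  rw [PySem.Set.ofList_cons]
  congr 1
  induction l1 with
  | nil =>
      simp only [List.nil_append]
      exact discard_not_mem _ _ (by simp [PySem.Set.mem_ofList, h2])
  | cons y l1' ih =>
      have hy : y = x := h1 y (by simp)
      subst hy
      rw [List.cons_append, PySem.Set.ofList_cons, discard_cons_self,
        discard_discard, ih (fun z hz => h1 z (by simp [hz]))]

theorem mfold_some (l : List Int) (m : Int) :
    l.foldl pvMstep (some m) = some (l.foldl min m) := by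
  induction l generalizing m with
  | nil => rfl
  | cons b l ih => simp only [List.foldl_cons, pvMstep, ih]

theorem sweep_spec (sp : List (Int × Int)) (hs : sp.Pairwise (fun a b => a.1 ≤ b.1)) :
    pvSweep sp = (((pvKeys sp).length : Int), ((pvKeys sp).map (pvVal sp)).sum) := by
  induction sp using pvSweep.induct with
  | case1 => simp [pvSweep, pvKeys]
  | case2 p rest g ih =>
      rcases List.pairwise_cons.mp hs with ⟨hpr, hrest⟩
      set q : Int × Int → Bool := fun y => y.1 == p.1 with hq
      set t := rest.takeWhile q with htdef
      set r' := rest.dropWhile q with hrdef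
      have hsplit : t ++ r' = rest := List.takeWhile_append_dropWhile
      have hg : pvSweepGroup p.1 p.2 rest
          = (t.foldl (fun m y => min m y.2) p.2, r') := pvSweepGroup_eq _ _ _
      have ht : ∀ y ∈ t, y.1 = p.1 := fun y hy => by
        have := List.mem_takeWhile_imp hy
        simpa [hq] using this
      have hr'sub : r'.Sublist rest := List.dropWhile_sublist q
      have hpair_r' : r'.Pairwise (fun a b => a.1 ≤ b.1) := hrest.sublist hr'sub
      have hr' : ∀ y ∈ r', p.1 < y.1 := by
        rcases hr : r' with _ | ⟨q0, r''⟩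
        · simp
        · have hq0ne : q0.1 ≠ p.1 := by
            have := List.head?_dropWhile_not q rest
            rw [← hrdef, hr] at this
            simpa [hq] using this
          have hq0mem : q0 ∈ rest := hr'sub.mem (by rw [hr]; simp)
          have hq0lt : p.1 < q0.1 := lt_of_le_of_ne (hpr q0 hq0mem) (Ne.symm hq0ne)
          intro y hy
          rcases List.mem_cons.mp hy with rfl | hy'
          · exact hq0lt
          · have : q0.1 ≤ y.1 := by
              have hp2 : (q0 :: r'').Pairwise (fun a b => a.1 ≤ b.1) := by
                rw [← hr]; exact hpair_r'
              exact (List.pairwise_cons.mp hp2).1 y hy'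
            omega
      have hnotmem : p.1 ∉ r'.map Prod.fst := by
        intro hc
        rcases List.mem_map.mp hc with ⟨y, hy, hyx⟩
        exact absurd hyx (by have := hr' y hy; omega)
      have hkeys : pvKeys (p :: rest) = p.1 :: pvKeys r' := by
        simp only [pvKeys, List.map_cons, ← hsplit, List.map_append]
        exact discard_ofList _ _ _ (fun y hy => by
          rcases List.mem_map.mp hy with ⟨z, hz, rfl⟩; exact ht z hz) hnotmem
      have hbids_p : pvBids (p :: rest) p.1 = p.2 :: t.map Prod.snd := by
        simp only [pvBids, List.filter_cons, beq_self_eq_true, if_pos, ← hsplit,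
          List.filter_append, List.map_cons, List.map_append]
        congr 1
        · rw [List.filter_eq_self.mpr (fun y hy => by simp [ht y hy]),
            List.filter_eq_nil_iff.mpr (fun y hy => by simp [ne_of_gt (hr' y hy)])]
          simp
      have hval_p : pvVal (p :: rest) p.1 = t.foldl (fun m y => min m y.2) p.2 := by
        rw [pvVal, hbids_p, List.foldl_cons]
        show ((t.map Prod.snd).foldl pvMstep (some p.2)).getD 0 = _
        rw [mfold_some, List.foldl_map]
        rfl
      have hval_r : ∀ k ∈ pvKeys r', pvVal (p :: rest) k = pvVal r' k := by
        intro k hk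
        have hkmem : k ∈ r'.map Prod.fst := by
          simpa [pvKeys, PySem.Set.mem_ofList] using hk
        rcases List.mem_map.mp hkmem with ⟨y, hy, rfl⟩
        have hkne : p.1 ≠ y.1 := ne_of_lt (hr' y hy)
        simp only [pvVal, pvBids, List.filter_cons, ← hsplit, List.filter_append]
        rw [if_neg (by simp [hkne]),
          List.filter_eq_nil_iff.mpr (fun z hz => by
            have : p.1 < y.1 := hr' y hy
            simp [ht z hz]; omega)]
        simp
      have hg2 : g = (t.foldl (fun m y => min m y.2) p.2, r') := hg
      rw [hg2] at ih
      simp only [pvSweep, hg]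
      rw [ih hpair_r', hkeys]
      have hmapr : (pvKeys r').map (pvVal (p :: rest))
          = (pvKeys r').map (pvVal r') := List.map_congr_left hval_r
      simp only [List.map_cons, List.sum_cons, List.length_cons, hval_p, hmapr]
      refine Prod.ext ?_ ?_
      · push_cast; ring
      · push_cast; ring

theorem pairs_eq_zip (projectID bid : List Int) (h : projectID.length ≤ bid.length) :
    (PySem.List.pyRange 0 (PySem.List.len projectID) 1).map
      (fun i => (PySem.List.pyGetD projectID i 0, PySem.List.pyGetD bid i 0))
    = projectID.zip bid := by
  apply List.ext_getElem
  · simp [PySem.List.length_pyRange_one, PySem.List.len]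
    omega
  · intro n h1 h2
    have hn : n < projectID.length := by
      simpa [PySem.List.length_pyRange_one, PySem.List.len] using h1
    simp only [List.getElem_map, PySem.List.getElem_pyRange_one, List.getElem_zip]
    rw [show ((0:Int) + n) = ((n:Nat):Int) by omega]
    rw [PySem.List.pyGetD_natCast, PySem.List.pyGetD_natCast]
    simp [List.getD, hn, (by omega : n < bid.length)]

theorem dict_get?_foldl (ps : List (Int × Int)) (d : PySem.Dict Int Int) (k : Int) :
    (ps.foldl
      (fun d p =>
        if d.contains p.1 = false then d.insert p.1 p.2
        else d.insert p.1 (min (d.getD p.1 0) p.2)) d).get? k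
    = (pvBids ps k).foldl pvMstep (d.get? k) := by
  induction ps generalizing d with
  | nil => simp [pvBids]
  | cons p rest ih =>
      simp only [List.foldl_cons]
      rw [ih]
      have hb : pvBids (p :: rest) k
          = if p.1 = k then p.2 :: pvBids rest k else pvBids rest k := by
        simp only [pvBids, List.filter_cons]
        by_cases hk : p.1 = k <;> simp [hk]
      have hstep :
          ((if d.contains p.1 = false then d.insert p.1 p.2
            else d.insert p.1 (min (d.getD p.1 0) p.2)).get? k)
          = if p.1 = k then pvMstep (d.get? k) p.2 else d.get? k := by
        by_cases hk : p.1 = k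
        · subst hk
          rcases ho : d.get? p.1 with _ | m
          · have hc : d.contains p.1 = false := by
              rw [PySem.Dict.contains_eq_isSome_get?, ho]; rfl
            simp [hc, PySem.Dict.get?_insert_self, pvMstep]
          · have hc : d.contains p.1 = true := by
              rw [PySem.Dict.contains_eq_isSome_get?, ho]; rfl
            simp [hc, PySem.Dict.get?_insert_self, pvMstep, ho,
              PySem.Dict.getD_eq_get?_getD]
        · have hne : k ≠ p.1 := fun h => hk h.symm
          split <;> rw [PySem.Dict.get?_insert_of_ne _ _ hne]
      rw [hstep, hb]
      by_cases hk : p.1 = k <;> simp [hk]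

theorem main (numProjects : Int) (projectID bid : List Int)
    (h : projectID.length ≤ bid.length) :
    (let d : PySem.Dict Int Int :=
      (PySem.List.pyRange 0 (PySem.List.len projectID) 1).foldl
        (fun d i =>
          if d.contains (PySem.List.pyGetD projectID i 0) = false then
            d.insert (PySem.List.pyGetD projectID i 0) (PySem.List.pyGetD bid i 0)
          else
            d.insert (PySem.List.pyGetD projectID i 0)
              (min (d.getD (PySem.List.pyGetD projectID i 0) 0) (PySem.List.pyGetD bid i 0)))
        PySem.Dict.empty
    if (d.size : Int) < numProjects then -1 else d.values.sum)
    =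
    (let pairs := (PySem.List.pyRange 0 (PySem.List.len projectID) 1).map
        (fun i => (PySem.List.pyGetD projectID i 0, PySem.List.pyGetD bid i 0))
      let sp := PySem.List.sorted pairs (fun p => p.1) false
      let r := pvSweep sp
      if r.1 < numProjects then -1 else r.2) := by
  rw [pairs_eq_zip projectID bid h]
  set ps := projectID.zip bid with hps
  -- A side dictionary
  set dA : PySem.Dict Int Int :=
    (PySem.List.pyRange 0 (PySem.List.len projectID) 1).foldl
      (fun d i =>
        if d.contains (PySem.List.pyGetD projectID i 0) = false then
          d.insert (PySem.List.pyGetD projectID i 0) (PySem.List.pyGetD bid i 0)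
        else
          d.insert (PySem.List.pyGetD projectID i 0)
            (min (d.getD (PySem.List.pyGetD projectID i 0) 0) (PySem.List.pyGetD bid i 0)))
      PySem.Dict.empty with hdA
  have hd : dA = ps.foldl
      (fun d p =>
        if d.contains p.1 = false then d.insert p.1 p.2
        else d.insert p.1 (min (d.getD p.1 0) p.2)) PySem.Dict.empty := by
    rw [hdA, hps, ← pairs_eq_zip projectID bid h, List.foldl_map]
  have hget : ∀ k, dA.get? k = (pvBids ps k).foldl pvMstep none := by
    intro k
    rw [hd, dict_get?_foldl]
    simp [PySem.Dict.get?_empty]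
  have hkeys : dA.keys = pvKeys ps := by
    rw [hd]
    have he : (fun (d : PySem.Dict Int Int) (p : Int × Int) =>
        if d.contains p.1 = false then d.insert p.1 p.2
        else d.insert p.1 (min (d.getD p.1 0) p.2))
        = fun d p => d.insert p.1
            (if d.contains p.1 = false then p.2 else min (d.getD p.1 0) p.2) := by
      funext d p
      by_cases hc : d.contains p.1 = false <;> simp [hc]
    rw [he, PySem.Dict.keys_foldl_insert_key]
    simp [PySem.Dict.keys_empty, pvKeys, PySem.Set.update, PySem.Set.ofList]
  have hnodup : dA.keys.Nodup := by rw [hkeys]; exact PySem.Set.nodup_ofList _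
  have hsize : dA.size = dA.keys.length := by
    simp [PySem.Dict.size, PySem.Dict.keys]
  have hvalD : ∀ k, dA.getD k 0 = pvVal ps k := by
    intro k
    rw [PySem.Dict.getD_eq_get?_getD, hget, pvVal]
  have hvalues : dA.values.sum = ((pvKeys ps).map (pvVal ps)).sum := by
    have h1 : dA.values = dA.items.map (fun p => dA.getD p.1 0) := by
      have : dA.values = dA.items.map Prod.snd := by simp [PySem.Dict.values]
      rw [this]
      apply List.map_congr_left
      intro p hp
      have hp' : (p.1, p.2) ∈ dA.items := by simpa using hp
      exact (PySem.Dict.getD_of_mem_items dA hp' hnodup 0).symm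
    rw [h1, show dA.items.map (fun p => dA.getD p.1 0)
        = (dA.items.map Prod.fst).map (fun k => dA.getD k 0) by rw [List.map_map]; rfl]
    rw [show dA.items.map Prod.fst = dA.keys by simp [PySem.Dict.keys], hkeys]
    congr 1
    exact List.map_congr_left (fun k _ => hvalD k)
  -- B side
  set sp := PySem.List.sorted ps (fun p => p.1) false with hsp
  have hperm : sp.Perm ps := PySem.List.sorted_perm ps _ _
  have hpw : sp.Pairwise (fun a b => a.1 ≤ b.1) := PySem.List.sorted_pairwise ps _
  have hsweep := sweep_spec sp hpw
  haveI : RightCommutative pvMstep := ⟨by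
    intro o a b
    rcases o with _ | m <;> simp [pvMstep] <;> omega⟩
  have hval : ∀ k, pvVal sp k = pvVal ps k := by
    intro k
    have hb : (pvBids sp k).Perm (pvBids ps k) := ((hperm.filter _).map _)
    rw [pvVal, pvVal, hb.foldl_eq]
  have hkp : (pvKeys sp).Perm (pvKeys ps) := by
    apply (List.perm_ext_iff_of_nodup (PySem.Set.nodup_ofList _) (PySem.Set.nodup_ofList _)).mpr
    intro x
    simp [PySem.Set.mem_ofList, (hperm.map Prod.fst).mem_iff]
  have hsum : ((pvKeys sp).map (pvVal sp)).sum = ((pvKeys ps).map (pvVal ps)).sum := by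
    rw [List.map_congr_left (fun k _ => hval k)]
    exact (hkp.map _).sum_eq
  have hlen : (pvKeys sp).length = (pvKeys ps).length := hkp.length_eq
  -- assemble
  have hS : pvSweep sp = (((pvKeys ps).length : Int), ((pvKeys ps).map (pvVal ps)).sum) := by
    rw [hsweep, hlen, hsum]
  simp only [hsize, hkeys, hvalues]
  show (if ((pvKeys ps).length : Int) < numProjects then -1
      else ((pvKeys ps).map (pvVal ps)).sum)
    = if (pvSweep sp).1 < numProjects then -1 else (pvSweep sp).2
  rw [hS]

-- ===== VERDICT (by name: the statement is the Claim_ definition above) =====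
theorem freelancing_platform_spec : Claim_equal_freelancing_platform := by
  intro numProjects projectID bid _hDom hPre
  exact main numProjects projectID bid hPre
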